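-- pv_equiv track=rewrite | github.com/joowhan/Translation_Project | lab/highlow_factory/ver3_chari/high2low_mecabBase_web.py | rememberSpace_k
-- ===== SOURCE A (Python) =====
-- def rememberSpace_k(lis, input):
--
--     rlis = []
--
--     for i in range(len(lis)):
--         if lis[i]==input:
--             rlis.append(i)
--
--     for i in range(len(rlis)):
--         rlis[i] = rlis[i]-i
--     return rlis
-- ===== SOURCE B (Python) =====
-- def rememberSpace_k(lis, input):
--     # Single pass: append the running count of non-matching elements seen so far
--     # at each match; equals match-index minus matches-before, as in A.
--     result = []
--     nonmatches = 0
--     for x in lis: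
--         if x == input:
--             result.append(nonmatches)
--         else:
--             nonmatches += 1
--     return result
-- ===== Notes on version B (the rewrite author's own statement) =====
-- stated objective: simpler
-- what changed: Instead of collecting match indices and then subtracting each one's position in a second loop, B does one pass maintaining a running count of non-matching elements and emits that count at each match.
import Mathlib
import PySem

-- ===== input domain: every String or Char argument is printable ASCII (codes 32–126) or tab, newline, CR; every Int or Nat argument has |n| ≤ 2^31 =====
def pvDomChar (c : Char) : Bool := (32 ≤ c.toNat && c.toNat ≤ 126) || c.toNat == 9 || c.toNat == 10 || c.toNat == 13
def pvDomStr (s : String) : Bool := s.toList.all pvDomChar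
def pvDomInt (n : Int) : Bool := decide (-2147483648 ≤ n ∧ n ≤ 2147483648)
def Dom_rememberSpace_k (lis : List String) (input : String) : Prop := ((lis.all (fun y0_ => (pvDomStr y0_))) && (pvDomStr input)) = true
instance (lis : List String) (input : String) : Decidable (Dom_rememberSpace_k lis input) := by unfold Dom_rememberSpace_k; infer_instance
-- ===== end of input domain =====

-- B replaces A's collect-indices-then-subtract-position two-loop scheme by one pass
-- that emits the running count of non-matching elements at each match (simpler).

-- ===== PORT A =====
def rememberSpace_k (lis : List String) (input : String) : List Int :=
  -- first loop: for i in range(len(lis)): if lis[i]==input: rlis.append(i)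
  let rlis : List Int :=
    (PySem.List.pyRange 0 (lis.length : Int) 1).foldl
      (fun acc i => if PySem.List.pyGetD lis i "" = input then acc ++ [i] else acc) []
  -- second loop: for i in range(len(rlis)): rlis[i] = rlis[i]-i  (in-place index update)
  (PySem.List.pyRange 0 (rlis.length : Int) 1).foldl
    (fun acc i => acc ++ [PySem.List.pyGetD rlis i 0 - i]) []

-- ===== PORT B =====
def rememberSpace_k_alt (lis : List String) (input : String) : List Int :=
  (lis.foldl
    (fun (st : List Int × Int) x =>
      if x = input then (st.1 ++ [st.2], st.2) else (st.1, st.2 + 1))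
    ([], 0)).1

-- ===== PRECONDITION & SPEC =====
def Spec_rememberSpace_k (lis : List String) (input : String) (out : List Int) : Prop := out = rememberSpace_k_alt lis input
instance (lis : List String) (input : String) (out : List Int) : Decidable (Spec_rememberSpace_k lis input out) := by unfold Spec_rememberSpace_k; infer_instance

-- ===== CLAIM (what is proved, stated in full; the proofs are below) =====
def Claim_equal_rememberSpace_k : Prop := ∀ (lis : List String) (input : String), Dom_rememberSpace_k lis input → Spec_rememberSpace_k lis input (rememberSpace_k lis input)

-- ===== LEMMAS AND PROOFS =====

/-- reference: at each match emit `c`, the count of non-matches so far. -/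
def bref (xs : List String) (input : String) (c : Int) : List Int :=
  match xs with
  | [] => []
  | x :: xs => if x = input then c :: bref xs input c else bref xs input (c + 1)

lemma bref_key (input : String) : ∀ (xs : List String) (i j : Int),
    (PySem.List.enumerate
      (((PySem.List.enumerate xs i).filter (fun e => e.2 = input)).map (·.1)) j).map
      (fun p => p.2 - p.1) = bref xs input (i - j) := by
  intro xs
  induction xs with
  | nil => intro i j; simp [PySem.List.enumerate_nil, bref]
  | cons x xs ih =>
    intro i j
    rw [PySem.List.enumerate_cons]
    by_cases h : x = input
    · have e : i + 1 - (j + 1) = i - j := by ring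
      simp only [List.filter_cons, h, decide_true, if_true, List.map_cons,
        PySem.List.enumerate_cons, List.map_cons, bref, ih (i + 1) (j + 1), e]
    · have e : i + 1 - j = i - j + 1 := by ring
      simp only [List.filter_cons, h, decide_false, Bool.false_eq_true, if_false, bref,
        ih (i + 1) j, e]

lemma bref_B (input : String) : ∀ (xs : List String) (acc : List Int) (c : Int),
    (xs.foldl
      (fun (st : List Int × Int) x =>
        if x = input then (st.1 ++ [st.2], st.2) else (st.1, st.2 + 1))
      (acc, c)).1 = acc ++ bref xs input c := by
  intro xs
  induction xs with
  | nil => intro acc c; simp [bref]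
  | cons x xs ih =>
    intro acc c
    by_cases h : x = input
    · simp only [List.foldl_cons, ih, bref, if_pos h, List.append_assoc,
        List.singleton_append]
    · simp only [List.foldl_cons, ih, bref, if_neg h]

lemma filter_range_eq (lis : List String) (input : String) :
    (PySem.List.pyRange 0 (lis.length : Int) 1).filter
      (fun i => PySem.List.pyGetD lis i "" = input)
    = ((PySem.List.enumerate lis 0).filter (fun e => e.2 = input)).map (·.1) := by
  have h0 : PySem.List.pyRange 0 (lis.length : Int) 1
      = (PySem.List.enumerate lis 0).map (·.1) := by
    rw [PySem.List.map_fst_enumerate]; norm_num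
  rw [h0, List.filter_map]
  congr 1
  apply List.filter_congr
  intro e he
  rcases (PySem.List.mem_enumerate_iff _ _ _).1 he with ⟨k, hk, rfl⟩
  simp [PySem.List.pyGetD_natCast, hk]

-- ===== VERDICT (by name: the statement is the Claim_ definition above) =====
theorem rememberSpace_k_spec : Claim_equal_rememberSpace_k := by
  intro lis input _
  unfold Spec_rememberSpace_k rememberSpace_k rememberSpace_k_alt
  rw [PySem.List.foldl_append_ite_eq_filter, List.nil_append, filter_range_eq]
  set rlis := ((PySem.List.enumerate lis 0).filter (fun e => e.2 = input)).map (·.1) with hr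
  rw [PySem.List.foldl_append_singleton_eq_map, List.nil_append]
  have henum : (PySem.List.pyRange 0 (rlis.length : Int) 1).map
      (fun i => PySem.List.pyGetD rlis i 0 - i)
      = (PySem.List.enumerate rlis 0).map (fun p => p.2 - p.1) := by
    rw [PySem.List.enumerate_eq_map_pyRange rlis 0, List.map_map]
    rfl
  rw [henum, hr, bref_key input lis 0 0, bref_B input lis [] 0, List.nil_append]
  norm_num
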